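-- pv_equiv track=rewrite | github.com/brianrainer/leetcode-grind | codeforces-0944-div4/c_solve.py | solve
-- ===== SOURCE A (Python) =====
-- def solve(a,b,c,d):
--
--     a,b = min(a,b), max(a,b)
--     c,d = min(c,d), max(c,d)
--
--     count = 0
--     while a<b:
--         if a==c or a==d:
--             count +=1
--         a+=1
--
--     if count == 1:
--         return "YES"
--     return "NO"
-- ===== SOURCE B (Python) =====
-- def solve(a, b, c, d):
--     lo, hi = min(a, b), max(a, b)
--     in_c = lo <= c < hi
--     in_d = lo <= d < hi
--     hits = in_c + (c != d and in_d)
--     return "YES" if hits == 1 else "NO"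
-- ===== Notes on version B (the rewrite author's own statement) =====
-- stated objective: faster
-- what changed: Replaces the O(b-a) scan of every integer in [min(a,b),max(a,b)) with two constant-time interval-membership tests for c and d, counting a hit only once when c == d.
import Mathlib
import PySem

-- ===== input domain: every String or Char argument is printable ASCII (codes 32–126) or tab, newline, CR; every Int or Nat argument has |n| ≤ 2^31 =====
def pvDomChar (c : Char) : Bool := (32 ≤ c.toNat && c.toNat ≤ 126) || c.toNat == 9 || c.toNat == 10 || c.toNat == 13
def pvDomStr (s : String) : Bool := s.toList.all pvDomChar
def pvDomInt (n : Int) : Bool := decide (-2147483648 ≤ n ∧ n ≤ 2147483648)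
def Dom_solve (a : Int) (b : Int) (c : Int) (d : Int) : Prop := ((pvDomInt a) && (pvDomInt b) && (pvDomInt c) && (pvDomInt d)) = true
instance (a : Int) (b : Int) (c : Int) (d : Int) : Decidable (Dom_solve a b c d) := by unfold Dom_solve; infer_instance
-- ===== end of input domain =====

-- B replaces A's linear scan of [min(a,b),max(a,b)) with two O(1) interval-membership tests (dedup when c = d): asymptotically faster.


-- ===== PORT A =====
-- the `while a < b` loop of A, carrying (a, count); recursion on the decreasing measure (b - a).toNat
def solveGo (a : Int) (b : Int) (c : Int) (d : Int) (count : Int) : Int :=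
  if _h : a < b then
    solveGo (a + 1) b c d (if a = c ∨ a = d then count + 1 else count)
  else count
termination_by (b - a).toNat
decreasing_by omega

def solve (a : Int) (b : Int) (c : Int) (d : Int) : String :=
  let a' := min a b; let b' := max a b
  let c' := min c d; let d' := max c d
  let count := solveGo a' b' c' d' 0
  if count = 1 then "YES" else "NO"

-- ===== PORT B =====
def solve_alt (a : Int) (b : Int) (c : Int) (d : Int) : String :=
  let lo := min a b; let hi := max a b
  let inC : Bool := decide (lo ≤ c ∧ c < hi)
  let inD : Bool := decide (lo ≤ d ∧ d < hi)
  let hits : Int := (if inC then 1 else 0) + (if c ≠ d ∧ inD then 1 else 0)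
  if hits = 1 then "YES" else "NO"

-- ===== PRECONDITION & SPEC =====
def Spec_solve (a : Int) (b : Int) (c : Int) (d : Int) (out : String) : Prop := out = solve_alt a b c d
instance (a : Int) (b : Int) (c : Int) (d : Int) (out : String) : Decidable (Spec_solve a b c d out) := by unfold Spec_solve; infer_instance

-- ===== CLAIM (what is proved, stated in full; the proofs are below) =====
def Claim_equal_solve : Prop := ∀ (a : Int) (b : Int) (c : Int) (d : Int), Dom_solve a b c d → Spec_solve a b c d (solve a b c d)

-- ===== LEMMAS AND PROOFS =====
-- the closed form of A's loop: count plus the number of hits of {c,d} in [a,b), counted once when c = d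
lemma solveGo_closed (a b c d count : Int) :
    solveGo a b c d count =
      count + ((if a ≤ c ∧ c < b then 1 else 0) +
               (if c ≠ d ∧ a ≤ d ∧ d < b then 1 else 0)) := by
  by_cases h : a < b
  · rw [solveGo]
    simp only [h, dif_pos]
    rw [solveGo_closed (a + 1)]
    split_ifs <;> omega
  · rw [solveGo]
    simp only [h, dif_neg, not_false_iff]
    split_ifs <;> omega
termination_by (b - a).toNat
decreasing_by omega

-- ===== VERDICT (by name: the statement is the Claim_ definition above) =====
theorem solve_spec : Claim_equal_solve := by
  intro a b c d _
  unfold Spec_solve solve solve_alt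
  simp only [solveGo_closed, min_def, max_def, decide_eq_true_eq]
  split_ifs <;> first | rfl | omega
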